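-- pv_equiv track=rewrite | github.com/KexinNiu/ibex_cobra | eval_clean.py | check_inter
-- ===== SOURCE A (Python) =====
-- def check_inter(uniprotecs,cleanecs,counts,total):
--     # re = [0,0,0,0]
--     # ptoto =[0,0,0,0]
--     flage=False
--     if ';' in uniprotecs:
--         uniprotecs = uniprotecs.split('; ')
--     for e in uniprotecs:
--         level = e.count('-')
--         for ec in cleanecs:
--             total[level] +=1
--             if ec.startswith(e.split('-')[0]):
--                 counts[level] +=1
--                 flage=True
--     return counts,total,flage
-- ===== SOURCE B (Python) =====
-- def check_inter(uniprotecs, cleanecs, counts, total):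
--     # Aggregate per EC entry: count matching cleanecs once per distinct prefix
--     # (memoised) and add it in bulk, instead of A's per-pair increments.
--     if not cleanecs:
--         return counts, total, False
--     items = uniprotecs.split('; ') if ';' in uniprotecs else uniprotecs
--     m = len(cleanecs)
--     cache = {}
--     flage = False
--     for e in items:
--         level = e.count('-')
--         prefix = e.split('-')[0]
--         c = cache.get(prefix)
--         if c is None:
--             c = sum(1 for ec in cleanecs if ec.startswith(prefix))
--             cache[prefix] = c
--         total[level] += m
--         if c:
--             counts[level] += c
--             flage = True
--     return counts, total, flage
-- ===== Notes on version B (the rewrite author's own statement) =====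
-- stated objective: faster
-- what changed: A increments total/counts once per (EC entry, clean EC) pair in a nested loop; B scans cleanecs once per distinct prefix (memoised in a dict) and adds len(cleanecs) and the cached match count in bulk per entry, returning early when cleanecs is empty.
import Mathlib
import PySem

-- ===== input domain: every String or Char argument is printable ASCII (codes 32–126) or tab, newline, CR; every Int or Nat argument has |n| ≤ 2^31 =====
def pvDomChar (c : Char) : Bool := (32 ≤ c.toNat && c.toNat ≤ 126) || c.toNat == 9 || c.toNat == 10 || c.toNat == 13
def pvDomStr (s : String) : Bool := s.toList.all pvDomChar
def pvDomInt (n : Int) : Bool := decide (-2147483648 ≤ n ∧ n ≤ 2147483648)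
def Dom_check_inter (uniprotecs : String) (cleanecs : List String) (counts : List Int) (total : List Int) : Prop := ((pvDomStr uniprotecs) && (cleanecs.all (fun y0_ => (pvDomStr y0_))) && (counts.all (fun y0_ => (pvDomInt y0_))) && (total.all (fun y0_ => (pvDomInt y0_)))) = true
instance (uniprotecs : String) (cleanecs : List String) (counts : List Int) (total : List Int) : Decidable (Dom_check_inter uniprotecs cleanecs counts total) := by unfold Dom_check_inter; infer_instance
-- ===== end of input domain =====

-- B replaces A's per-(entry, EC) increment loop by one bulk addition per EC entry, with the
-- per-prefix match count memoised in a dict (objective: faster; measured faster by the timing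
-- run). Both Pythons mutate counts/total in place; the equivalence proved is about the
-- RETURN value.

-- ===== PORT A =====
-- the iteration items: the split list when ';' occurs, else the characters of the string
def pvItems (uniprotecs : String) : List String :=
  if PySem.Str.isIn ";" uniprotecs then (PySem.Str.split? uniprotecs "; ").getD []
  else uniprotecs.toList.map (fun c => String.ofList [c])

def check_inter (uniprotecs : String) (cleanecs : List String) (counts : List Int) (total : List Int) : List Int × List Int × Bool :=
  let flage := false
  (pvItems uniprotecs).foldl
    (fun (st : List Int × List Int × Bool) e =>
      let level := PySem.Str.count e "-"
      cleanecs.foldl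
        (fun (st : List Int × List Int × Bool) ec =>
          let t' := st.2.1.set level (st.2.1.getD level 0 + 1)
          if PySem.Str.startswith ec (((PySem.Str.split? e "-").getD []).getD 0 "") then
            (st.1.set level (st.1.getD level 0 + 1), t', true)
          else (st.1, t', st.2.2))
        st)
    (counts, total, flage)

-- ===== PORT B =====
def check_inter_alt (uniprotecs : String) (cleanecs : List String) (counts : List Int) (total : List Int) : List Int × List Int × Bool :=
  if cleanecs = [] then (counts, total, false) else
  ((pvItems uniprotecs).foldl
    (fun (st : (List Int × List Int × Bool) × PySem.Dict String Int) e =>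
      let level := PySem.Str.count e "-"
      let pfx := ((PySem.Str.split? e "-").getD []).getD 0 ""
      let cc : Int × PySem.Dict String Int :=
        match PySem.Dict.get? st.2 pfx with
        | some c => (c, st.2)
        | none =>
          let c : Int := cleanecs.foldl (fun acc ec => if PySem.Str.startswith ec pfx then acc + 1 else acc) 0
          (c, st.2.insert pfx c)
      let total := st.1.2.1.set level (st.1.2.1.getD level 0 + (cleanecs.length : Int))
      if cc.1 ≠ 0 then ((st.1.1.set level (st.1.1.getD level 0 + cc.1), total, true), cc.2)
      else ((st.1.1, total, st.1.2.2), cc.2))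
    ((counts, total, false), PySem.Dict.empty)).1

-- ===== PRECONDITION & SPEC =====
-- Pre_ excludes exactly the inputs on which A raises IndexError: cleanecs nonempty and some
-- EC entry whose wildcard level indexes past total or, when that entry has a matching clean
-- EC, past counts.  B raises on exactly the same inputs.
def Pre_check_inter (uniprotecs : String) (cleanecs : List String) (counts : List Int) (total : List Int) : Prop :=
  cleanecs = [] ∨
    ∀ e ∈ pvItems uniprotecs,
      PySem.Str.count e "-" < total.length ∧
      ((∃ ec ∈ cleanecs, PySem.Str.startswith ec (((PySem.Str.split? e "-").getD []).getD 0 "") = true) →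
        PySem.Str.count e "-" < counts.length)
instance (uniprotecs : String) (cleanecs : List String) (counts : List Int) (total : List Int) : Decidable (Pre_check_inter uniprotecs cleanecs counts total) := by unfold Pre_check_inter; infer_instance

def pvWitness_check_inter : String × List String × List Int × List Int :=
  ("1.2.3.4; 1.2.-.-", ["1.2.3.4", "2.1.1.1"], [0, 0, 0], [0, 0, 0])

def Spec_check_inter (uniprotecs : String) (cleanecs : List String) (counts : List Int) (total : List Int) (out : List Int × List Int × Bool) : Prop := out = check_inter_alt uniprotecs cleanecs counts total
instance (uniprotecs : String) (cleanecs : List String) (counts : List Int) (total : List Int) (out : List Int × List Int × Bool) : Decidable (Spec_check_inter uniprotecs cleanecs counts total out) := by unfold Spec_check_inter; infer_instance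

-- ===== CLAIM (what is proved, stated in full; the proofs are below) =====
def Claim_equal_check_inter : Prop := ∀ (uniprotecs : String) (cleanecs : List String) (counts : List Int) (total : List Int), Dom_check_inter uniprotecs cleanecs counts total → Pre_check_inter uniprotecs cleanecs counts total → Spec_check_inter uniprotecs cleanecs counts total (check_inter uniprotecs cleanecs counts total)

-- ===== LEMMAS AND PROOFS =====
def pvBump (xs : List Int) (i : Nat) (v : Int) : List Int := xs.set i (xs.getD i 0 + v)
theorem pvBump_zero (xs : List Int) (i : Nat) : pvBump xs i 0 = xs := by
  unfold pvBump
  by_cases h : i < xs.length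
  · simp [List.getD, h]
  · exact List.set_eq_of_length_le (le_of_not_gt h)
theorem pvBump_bump (xs : List Int) (i : Nat) (a b : Int) :
    pvBump (pvBump xs i a) i b = pvBump xs i (a + b) := by
  unfold pvBump
  by_cases h : i < xs.length
  · rw [List.set_set]; congr 1; simp [List.getD, h]; ring
  · rw [List.set_eq_of_length_le (le_of_not_gt h), List.set_eq_of_length_le (le_of_not_gt h),
        List.set_eq_of_length_le (le_of_not_gt h)]

theorem pvInnerA (l : List String) (lev : Nat) (p : String) (c t : List Int) (f : Bool) :
    l.foldl
      (fun (st : List Int × List Int × Bool) ec =>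
        let t' := st.2.1.set lev (st.2.1.getD lev 0 + 1)
        if PySem.Str.startswith ec p then
          (st.1.set lev (st.1.getD lev 0 + 1), t', true)
        else (st.1, t', st.2.2))
      (c, t, f)
    = (if (l.countP (fun ec => PySem.Str.startswith ec p) : Int) ≠ 0 then
          pvBump c lev (l.countP (fun ec => PySem.Str.startswith ec p))
        else c,
       pvBump t lev l.length,
       f || decide ((l.countP (fun ec => PySem.Str.startswith ec p) : Int) ≠ 0)) := by
  induction l generalizing c t f with
  | nil => simp [pvBump_zero]
  | cons ec rest ih =>
    simp only [List.foldl_cons, List.countP_cons]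
    by_cases hm : PySem.Str.startswith ec p
    · rw [if_pos hm, ih]
      have hcnt : ((rest.countP (fun ec => PySem.Str.startswith ec p) + 1 : Nat) : Int) ≠ 0 := by
        push_cast; omega
      simp only [hm, if_pos, decide_true, Bool.or_true, hcnt, if_true]
      rw [if_pos hcnt]
      simp only [Prod.mk.injEq]
      refine ⟨?_, ?_, by rw [decide_eq_true hcnt, Bool.or_true]; simp⟩
      · by_cases hr : ((rest.countP (fun ec => PySem.Str.startswith ec p) : Nat) : Int) ≠ 0
        · rw [if_pos hr]
          show pvBump (pvBump c lev 1) lev _ = pvBump c lev _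
          rw [pvBump_bump]; congr 1; push_cast; ring
        · rw [if_neg hr]
          show pvBump c lev 1 = pvBump c lev _
          congr 1; push_cast at hr ⊢; omega
      · show pvBump (pvBump t lev 1) lev _ = pvBump t lev _
        rw [pvBump_bump]; congr 1; push_cast [List.length_cons]; ring
    · rw [if_neg hm, ih]
      simp only [hm, Nat.add_zero]
      simp only [Prod.mk.injEq]
      refine ⟨rfl, ?_, rfl⟩
      show pvBump (pvBump t lev 1) lev _ = pvBump t lev _
      rw [pvBump_bump]; congr 1; push_cast [List.length_cons]; ring

def pvCnt (cleanecs : List String) (p : String) : Int :=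
  (cleanecs.countP (fun ec => PySem.Str.startswith ec p) : Int)

theorem pvOuter (cleanecs : List String) (items : List String)
    (c t : List Int) (f : Bool) (cache : PySem.Dict String Int)
    (hinv : ∀ p v, cache.get? p = some v → v = pvCnt cleanecs p) :
    (items.foldl
      (fun (st : (List Int × List Int × Bool) × PySem.Dict String Int) e =>
        let level := PySem.Str.count e "-"
        let pfx := ((PySem.Str.split? e "-").getD []).getD 0 ""
        let cc : Int × PySem.Dict String Int :=
          match PySem.Dict.get? st.2 pfx with
          | some c => (c, st.2)
          | none =>
            let c : Int := cleanecs.foldl (fun acc ec => if PySem.Str.startswith ec pfx then acc + 1 else acc) 0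
            (c, st.2.insert pfx c)
        let total := st.1.2.1.set level (st.1.2.1.getD level 0 + (cleanecs.length : Int))
        if cc.1 ≠ 0 then ((st.1.1.set level (st.1.1.getD level 0 + cc.1), total, true), cc.2)
        else ((st.1.1, total, st.1.2.2), cc.2))
      ((c, t, f), cache)).1
    = items.foldl
        (fun (st : List Int × List Int × Bool) e =>
          let level := PySem.Str.count e "-"
          cleanecs.foldl
            (fun (st : List Int × List Int × Bool) ec =>
              let t' := st.2.1.set level (st.2.1.getD level 0 + 1)
              if PySem.Str.startswith ec (((PySem.Str.split? e "-").getD []).getD 0 "") then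
                (st.1.set level (st.1.getD level 0 + 1), t', true)
              else (st.1, t', st.2.2))
            st)
        (c, t, f) := by
  induction items generalizing c t f cache with
  | nil => rfl
  | cons e rest ih =>
    simp only [List.foldl_cons]
    rw [pvInnerA]
    have hfresh : cleanecs.foldl
        (fun acc ec => if PySem.Str.startswith ec (((PySem.Str.split? e "-").getD []).getD 0 "") then acc + 1 else acc) 0
        = pvCnt cleanecs (((PySem.Str.split? e "-").getD []).getD 0 "") := by
      rw [PySem.List.foldl_if_add_one]
      simp [pvCnt]
    obtain ⟨cache', hmatch, hinv'⟩ :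
        ∃ cache',
          (match PySem.Dict.get? cache (((PySem.Str.split? e "-").getD []).getD 0 "") with
            | some c => (c, cache)
            | none =>
              ((cleanecs.foldl (fun acc ec => if PySem.Str.startswith ec (((PySem.Str.split? e "-").getD []).getD 0 "") then acc + 1 else acc) 0 : Int),
                cache.insert (((PySem.Str.split? e "-").getD []).getD 0 "")
                  (cleanecs.foldl (fun acc ec => if PySem.Str.startswith ec (((PySem.Str.split? e "-").getD []).getD 0 "") then acc + 1 else acc) 0)))
          = (pvCnt cleanecs (((PySem.Str.split? e "-").getD []).getD 0 ""), cache')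
          ∧ ∀ p v, cache'.get? p = some v → v = pvCnt cleanecs p := by
      rcases hcache : PySem.Dict.get? cache (((PySem.Str.split? e "-").getD []).getD 0 "") with _ | v
      · refine ⟨cache.insert (((PySem.Str.split? e "-").getD []).getD 0 "") (pvCnt cleanecs (((PySem.Str.split? e "-").getD []).getD 0 "")), by simp only [hcache]; rw [hfresh], ?_⟩
        intro p v hv
        by_cases hp : (((PySem.Str.split? e "-").getD []).getD 0 "") = p
        · subst hp
          rw [PySem.Dict.get?_insert_self] at hv
          cases hv
          rfl
        · rw [PySem.Dict.get?_insert_of_ne] at hv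
          · exact hinv p v hv
          · exact fun h => hp h.symm
      · exact ⟨cache, by simp only [hcache]; rw [hinv _ _ hcache], hinv⟩
    simp only [hmatch]
    by_cases hc : pvCnt cleanecs (((PySem.Str.split? e "-").getD []).getD 0 "") ≠ 0
    · rw [if_pos hc, ih _ _ _ _ hinv', if_pos (by simpa [pvCnt] using hc)]
      congr 1
      have hd : (decide (((cleanecs.countP fun ec => PySem.Str.startswith ec (((PySem.Str.split? e "-").getD []).getD 0 "") : Nat) : Int) ≠ 0)) = true :=
        decide_eq_true (by simpa [pvCnt] using hc)
      simp only [pvBump, pvCnt, hd, Bool.or_true]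
    · rw [if_neg hc, ih _ _ _ _ hinv', if_neg (by simpa [pvCnt] using hc)]
      congr 1
      have h0 : ((cleanecs.countP fun ec => PySem.Str.startswith ec (((PySem.Str.split? e "-").getD []).getD 0 "") : Nat) : Int) = 0 := by
        simpa [pvCnt] using hc
      simp only [pvBump, pvCnt, h0]
      norm_num

-- with no clean ECs, A's inner loop never runs and its outer fold is the identity
theorem pvA_nil (items : List String) (c t : List Int) (f : Bool) :
    (items.foldl
      (fun (st : List Int × List Int × Bool) e =>
        let level := PySem.Str.count e "-"
        ([] : List String).foldl
          (fun (st : List Int × List Int × Bool) ec =>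
            let t' := st.2.1.set level (st.2.1.getD level 0 + 1)
            if PySem.Str.startswith ec (((PySem.Str.split? e "-").getD []).getD 0 "") then
              (st.1.set level (st.1.getD level 0 + 1), t', true)
            else (st.1, t', st.2.2))
          st)
      (c, t, f)) = (c, t, f) := by
  induction items with
  | nil => rfl
  | cons e rest ih => exact ih

-- ===== VERDICT (by name: the statement is the Claim_ definition above) =====
theorem check_inter_spec : Claim_equal_check_inter := by
  intro uniprotecs cleanecs counts total _ _
  show check_inter uniprotecs cleanecs counts total = check_inter_alt uniprotecs cleanecs counts total
  unfold check_inter check_inter_alt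
  by_cases h : cleanecs = []
  · subst h
    rw [if_pos rfl]
    exact pvA_nil ..
  · rw [if_neg h]
    exact (pvOuter cleanecs (pvItems uniprotecs) counts total false PySem.Dict.empty
      (by intro p v hv; simp [PySem.Dict.get?, PySem.Dict.empty] at hv)).symm
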